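-- pv_equiv track=rewrite | github.com/gabriellaec/desoft-analise-exercicios | backup/user_076/ch64_2020_04_27_19_09_35_871736.py | acha_bigramas
-- ===== SOURCE A (Python) =====
-- def acha_bigramas (string):
--     lista = []
--     i=0
--     while i+1 < len(string):
--         bigrama = string[i] + string[i+1]
--         if bigrama not in lista:
--             lista.append(bigrama)
--         i+=1
--     return lista
-- ===== SOURCE B (Python) =====
-- def acha_bigramas(string):
--     # Different algorithm: traverse the bigrams in REVERSE, letting each write
--     # overwrite later occurrences so the dict ends up mapping every distinct
--     # bigram to its first-occurrence index; then SORT the distinct bigrams by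
--     # that index.  No membership test and no result accumulator at all.
--     bgs = [a + b for a, b in zip(string, string[1:])]
--     first = {}
--     for i, bg in reversed(list(enumerate(bgs))):
--         first[bg] = i
--     return sorted(first, key=first.get)
-- ===== Notes on version B (the rewrite author's own statement) =====
-- stated objective: alternative
-- what changed: Replaces A's single forward pass that interleaves bigram generation with a list-membership branch by a reverse-traversal/sort algorithm: iterate the bigrams backwards letting dict writes overwrite later occurrences (so each distinct bigram ends mapped to its first index), then sort the distinct bigrams by that index; no membership test or result accumulator remains.
import Mathlib
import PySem

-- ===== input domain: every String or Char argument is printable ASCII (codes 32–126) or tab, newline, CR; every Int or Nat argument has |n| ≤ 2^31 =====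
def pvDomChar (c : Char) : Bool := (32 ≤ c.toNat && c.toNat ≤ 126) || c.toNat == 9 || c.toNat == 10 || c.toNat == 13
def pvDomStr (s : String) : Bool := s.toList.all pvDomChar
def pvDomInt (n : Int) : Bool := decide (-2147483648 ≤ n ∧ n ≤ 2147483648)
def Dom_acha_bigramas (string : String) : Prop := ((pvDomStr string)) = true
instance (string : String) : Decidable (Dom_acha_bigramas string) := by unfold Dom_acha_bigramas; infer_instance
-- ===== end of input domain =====

-- B replaces A's forward accumulate-with-membership-test loop by a different algorithm:
-- traverse the bigrams in reverse overwriting dict entries (so each distinct bigram ends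
-- mapped to its first-occurrence index), then sort the distinct bigrams by that index.

-- ===== PORT A =====
-- while i+1 < len(string): bigrama = string[i]+string[i+1]; if bigrama not in lista: lista.append(bigrama); i+=1
def achaLoop (cs : List Char) (lista : List String) (i : Nat) : List String :=
  if _h : i + 1 < cs.length then
    let bigrama := String.mk [cs[i]!, cs[i+1]!]
    achaLoop cs (if bigrama ∈ lista then lista else lista ++ [bigrama]) (i + 1)
  else lista
termination_by cs.length - i

def acha_bigramas (string : String) : List String :=
  achaLoop string.toList [] 0

-- ===== PORT B =====
-- bgs = [a+b for a,b in zip(string, string[1:])]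
-- first = {};  for i, bg in reversed(list(enumerate(bgs))): first[bg] = i
-- return sorted(first, key=first.get)   (key always present, so first.get = getD _ 0)
def acha_bigramas_alt (string : String) : List String :=
  let cs := string.toList
  let bgs := (cs.zip cs.tail).map (fun p => String.mk [p.1, p.2])
  let first := ((PySem.List.enumerate bgs 0).reverse).foldl
      (fun d p => d.insert p.2 p.1) (PySem.Dict.empty : PySem.Dict String Int)
  PySem.List.sorted first.keys (fun k => first.getD k 0)

-- ===== PRECONDITION & SPEC =====
def Spec_acha_bigramas (string : String) (out : List String) : Prop := out = acha_bigramas_alt string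
instance (string : String) (out : List String) : Decidable (Spec_acha_bigramas string out) := by unfold Spec_acha_bigramas; infer_instance

-- ===== CLAIM (what is proved, stated in full; the proofs are below) =====
def Claim_equal_acha_bigramas : Prop := ∀ (string : String), Dom_acha_bigramas string → Spec_acha_bigramas string (acha_bigramas string)

-- ===== LEMMAS AND PROOFS =====

-- bigram list read off the list structure (proof helper)
def bigListL : List Char → List String
  | a :: b :: t => String.mk [a, b] :: bigListL (b :: t)
  | _ => []

theorem bigListL_eq_zip_map (cs : List Char) :
    bigListL cs = (cs.zip cs.tail).map (fun p => String.mk [p.1, p.2]) := by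
  match cs with
  | [] => rfl
  | [a] => rfl
  | a :: b :: t =>
    simp [bigListL, bigListL_eq_zip_map (b :: t)]

theorem bigListL_drop (cs : List Char) (i : Nat) (h : i + 1 < cs.length) :
    bigListL (cs.drop i) = String.mk [cs[i]!, cs[i+1]!] :: bigListL (cs.drop (i+1)) := by
  have h0 : i < cs.length := by omega
  have d0 : cs.drop i = cs[i] :: cs.drop (i+1) := List.drop_eq_getElem_cons h0
  have d1 : cs.drop (i+1) = cs[i+1] :: cs.drop (i+2) := List.drop_eq_getElem_cons h
  rw [d0, d1, bigListL, ← d1]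
  simp [h0, h]

theorem achaLoop_eq_update (cs : List Char) (lista : List String) (i : Nat) :
    achaLoop cs lista i = PySem.Set.update lista (bigListL (cs.drop i)) := by
  rw [achaLoop]
  split
  · next h =>
    rw [achaLoop_eq_update cs _ (i+1), bigListL_drop cs i h]
    simp [PySem.Set.update, PySem.Set.add]
  · next h =>
    have hlen : (cs.drop i).length ≤ 1 := by simp [List.length_drop]; omega
    rcases h' : cs.drop i with _ | ⟨a, _ | ⟨b, t⟩⟩
    · rfl
    · rfl
    · rw [h'] at hlen; simp at hlen
termination_by cs.length - i

-- the reverse fold's dict: lookup gives s + (first index), via foldr form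
theorem index?_cons_of_ne (x : String) (xs : List String) (bg : String) (h : bg ≠ x) :
    PySem.List.index? (x :: xs) bg = (PySem.List.index? xs bg).map (· + 1) := by
  simp [PySem.List.index?_eq_idxOf?, List.idxOf?_cons,
    (by simpa using fun h' => h h'.symm : (x == bg) = false)]

theorem foldr_enum_get? (xs : List String) (s : Int) (bg : String) :
    ((PySem.List.enumerate xs s).foldr (fun p d => d.insert p.2 p.1)
        (PySem.Dict.empty : PySem.Dict String Int)).get? bg
      = (PySem.List.index? xs bg).map (fun k => s + (k : Int)) := by
  induction xs generalizing s with
  | nil => simp [PySem.List.enumerate_nil, PySem.List.index?, PySem.Dict.get?_empty]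
  | cons x xs ih =>
    rw [PySem.List.enumerate_cons]
    simp only [List.foldr_cons]
    rw [PySem.Dict.get?_insert]
    by_cases hbg : bg = x
    · subst hbg
      rw [if_pos rfl, PySem.List.index?_cons_self]
      simp
    · rw [if_neg hbg, ih, index?_cons_of_ne x xs bg hbg]
      cases PySem.List.index? xs bg with
      | none => rfl
      | some k => simp; ring

-- first occurrences of a list, in order, are strictly increasing by idxOf
theorem pairwise_idxOf_dedup (xs : List String) :
    (PySem.List.dedup xs).Pairwise (fun a b => xs.idxOf a < xs.idxOf b) := by
  induction xs using List.reverseRecOn with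
  | nil => simp [PySem.List.dedup]
  | append_singleton xs y ih =>
    have hof : PySem.List.dedup (xs ++ [y]) = PySem.Set.add (PySem.List.dedup xs) y := by
      simp [PySem.List.dedup_eq_ofList, PySem.Set.ofList_eq_foldl, List.foldl_append]
    by_cases hy : y ∈ PySem.List.dedup xs
    · have hy' : y ∈ xs := (PySem.List.mem_dedup _ _).1 hy
      rw [hof, PySem.Set.add, if_pos (by simpa using hy)]
      refine ih.imp_of_mem ?_
      intro a b ha hb hab
      have ha' : a ∈ xs := (PySem.List.mem_dedup _ _).1 ha
      have hb' : b ∈ xs := (PySem.List.mem_dedup _ _).1 hb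
      rwa [List.idxOf_append_of_mem ha', List.idxOf_append_of_mem hb']
    · have hy' : y ∉ xs := fun h => hy ((PySem.List.mem_dedup _ _).2 h)
      rw [hof, PySem.Set.add, if_neg (by simpa using hy)]
      rw [List.pairwise_append]
      refine ⟨?_, by simp, ?_⟩
      · refine ih.imp_of_mem ?_
        intro a b ha hb hab
        have ha' : a ∈ xs := (PySem.List.mem_dedup _ _).1 ha
        have hb' : b ∈ xs := (PySem.List.mem_dedup _ _).1 hb
        rwa [List.idxOf_append_of_mem ha', List.idxOf_append_of_mem hb']
      · intro a ha b hb
        have hb' : b = y := by simpa using hb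
        rw [hb']
        have ha' : a ∈ xs := (PySem.List.mem_dedup _ _).1 ha
        rw [List.idxOf_append_of_mem ha']
        have h1 : xs.idxOf a < xs.length := List.idxOf_lt_length_of_mem ha'
        have h2 : (xs ++ [y]).idxOf y = xs.length := by
          rw [List.idxOf_append_of_notMem hy']
          simp
        omega

theorem index?_of_mem (xs : List String) (bg : String) (h : bg ∈ xs) :
    PySem.List.index? xs bg = some (xs.idxOf bg) := by
  induction xs with
  | nil => simp at h
  | cons x xs ih =>
    by_cases hbg : bg = x
    · subst hbg
      rw [PySem.List.index?_cons_self]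
      simp
    · rw [index?_cons_of_ne x xs bg hbg]
      have hmem : bg ∈ xs := by
        rcases List.mem_cons.1 h with h' | h'
        · exact absurd h' hbg
        · exact h'
      rw [ih hmem, List.idxOf_cons_ne _ (by simpa using fun h' => hbg h'.symm)]
      rfl

-- ===== VERDICT (by name: the statement is the Claim_ definition above) =====
theorem acha_bigramas_spec : Claim_equal_acha_bigramas := by
  intro s _
  unfold Spec_acha_bigramas acha_bigramas acha_bigramas_alt
  rw [achaLoop_eq_update, List.drop_zero, bigListL_eq_zip_map]
  set cs := s.toList with hcs
  set bgs := (cs.zip cs.tail).map (fun p => String.mk [p.1, p.2]) with hbgs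
  set first := ((PySem.List.enumerate bgs 0).reverse).foldl
      (fun d p => d.insert p.2 p.1) (PySem.Dict.empty : PySem.Dict String Int) with hfirst
  have hfoldr : first = (PySem.List.enumerate bgs 0).foldr
      (fun p d => d.insert p.2 p.1) PySem.Dict.empty := by
    rw [hfirst, List.foldl_reverse]
  have hget : ∀ bg, first.get? bg = (PySem.List.index? bgs bg).map (fun k => (k : Int)) := by
    intro bg
    rw [hfoldr, foldr_enum_get? bgs 0 bg]
    simp
  have hkeys : first.keys = PySem.Set.ofList bgs.reverse := by
    rw [hfirst, PySem.Dict.keys_foldl_insert_key]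
    have : ((PySem.List.enumerate bgs 0).reverse).map (fun p => p.2) = bgs.reverse := by
      rw [List.map_reverse, PySem.List.map_snd_enumerate]
    rw [this]
    simp [PySem.Set.ofList_eq_foldl, PySem.Set.update, PySem.Dict.keys_empty]
  have hmemkeys : ∀ k, k ∈ first.keys ↔ k ∈ bgs := by
    intro k
    rw [hkeys, PySem.Set.mem_ofList]
    exact List.mem_reverse
  have hnodup : first.keys.Nodup := by
    rw [hkeys]; exact PySem.Set.nodup_ofList _
  have hperm : (PySem.List.dedup bgs).Perm first.keys := by
    rw [List.perm_ext_iff_of_nodup (PySem.List.nodup_dedup _) hnodup]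
    intro a
    rw [PySem.List.mem_dedup, hmemkeys]
  have hkeyval : ∀ a ∈ bgs, first.getD a 0 = (bgs.idxOf a : Int) := by
    intro a ha
    rw [PySem.Dict.getD_eq_get?_getD, hget a, index?_of_mem bgs a ha]
    rfl
  have hpw : (PySem.List.dedup bgs).Pairwise (fun a b => first.getD a 0 < first.getD b 0) := by
    refine (pairwise_idxOf_dedup bgs).imp_of_mem ?_
    intro a b ha hb hab
    rw [hkeyval a ((PySem.List.mem_dedup _ _).1 ha), hkeyval b ((PySem.List.mem_dedup _ _).1 hb)]
    exact_mod_cast hab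
  have hsorted := PySem.List.sorted_eq_of_perm_of_pairwise_lt first.keys (PySem.List.dedup bgs) (fun k => first.getD k 0) hperm hpw
  rw [hsorted]
  simp [PySem.List.dedup_eq_ofList, PySem.Set.ofList_eq_foldl, PySem.Set.update]
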